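-- pv_equiv track=rewrite | github.com/SooOverpowered/AOC | 2020/06.py | part2
-- ===== SOURCE A (Python) =====
-- def part2(data):
--     blocks=data.rstrip().split('\n\n')
--     blocks=[item.split('\n') for item in blocks]
--     output=0
--     for block in blocks:
--         if len(block)==1:
--             output+=len(block[0])
--         else:
--             block=[set(item) for item in block]
--             output+=len(block[0].intersection(*block))
--     return output
-- ===== SOURCE B (Python) =====
-- def part2(data):
--     output = 0
--     for block in data.rstrip().split('\n\n'):
--         lines = block.split('\n')
--         if len(lines) == 1:
--             output += len(lines[0])
--         else:
--             counts = {}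
--             for line in lines:
--                 for ch in set(line):
--                     counts[ch] = counts.get(ch, 0) + 1
--             output += sum(1 for c in counts.values() if c == len(lines))
--     return output
-- ===== Notes on version B (the rewrite author's own statement) =====
-- stated objective: alternative
-- what changed: Replaces the per-group set-intersection chain with a character-frequency dict (each line deduplicated via set) followed by counting characters whose frequency equals the group size.
import Mathlib
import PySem

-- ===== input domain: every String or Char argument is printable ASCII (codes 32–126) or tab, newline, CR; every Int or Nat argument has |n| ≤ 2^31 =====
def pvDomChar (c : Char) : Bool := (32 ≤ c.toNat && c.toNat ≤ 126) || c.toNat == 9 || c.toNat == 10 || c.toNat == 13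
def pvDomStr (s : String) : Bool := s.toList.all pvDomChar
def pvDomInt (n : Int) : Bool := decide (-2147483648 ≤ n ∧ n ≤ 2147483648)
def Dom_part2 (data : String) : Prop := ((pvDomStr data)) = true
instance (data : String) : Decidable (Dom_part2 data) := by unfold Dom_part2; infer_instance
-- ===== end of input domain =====

-- B replaces each group's set-intersection chain by a per-character frequency dict
-- (each line deduplicated as a set) filtered for frequency = group size; alternative, same cost.

-- ===== PORT A =====
-- split('\n\n') / split('\n') have a non-empty literal separator, so Chars.splitOn is exact.
def part2 (data : String) : Int :=
  let blocks := PySem.Chars.splitOn (PySem.Str.rstrip data).toList "\n\n".toList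
  let blocks := blocks.map (fun item => PySem.Chars.splitOn item "\n".toList)
  blocks.foldl (fun output block =>
    if block.length == 1 then
      output + ((block.headD []).length : Int)
    else
      let sets : List (PySem.Set Char) := block.map (fun item => PySem.Set.ofList item)
      -- block[0].intersection(*block): intersect block[0] with every set of the group
      output + PySem.Set.len (sets.foldl PySem.Set.inter (sets.headD PySem.Set.empty))) 0

-- ===== PORT B =====
def part2_alt (data : String) : Int :=
  (PySem.Chars.splitOn (PySem.Str.rstrip data).toList "\n\n".toList).foldl
    (fun output block =>
      let lines := PySem.Chars.splitOn block "\n".toList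
      if lines.length == 1 then
        output + ((lines.headD []).length : Int)
      else
        let counts : PySem.Dict Char Int :=
          lines.foldl (fun d line =>
            (PySem.Set.ofList line).foldl (fun d ch => d.insert ch (d.getD ch 0 + 1)) d)
            PySem.Dict.empty
        output + (PySem.Dict.values counts).foldl
            (fun acc c => if c == (lines.length : Int) then acc + 1 else acc) 0) 0

-- ===== PRECONDITION & SPEC =====
def Spec_part2 (data : String) (out : Int) : Prop := out = part2_alt data
instance (data : String) (out : Int) : Decidable (Spec_part2 data out) := by unfold Spec_part2; infer_instance

-- ===== CLAIM (what is proved, stated in full; the proofs are below) =====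
def Claim_equal_part2 : Prop := ∀ (data : String), Dom_part2 data → Spec_part2 data (part2 data)

-- ===== LEMMAS AND PROOFS =====

theorem mem_foldl_inter (ts : List (PySem.Set Char)) (s : PySem.Set Char) (x : Char) :
    x ∈ ts.foldl PySem.Set.inter s ↔ x ∈ s ∧ ∀ t ∈ ts, x ∈ t := by
  induction ts generalizing s with
  | nil => simp
  | cons t ts ih =>
    simp [List.foldl_cons, ih, PySem.Set.mem_inter]
    tauto

theorem nodup_foldl_inter (ts : List (PySem.Set Char)) (s : PySem.Set Char) (h : s.Nodup) :
    (ts.foldl PySem.Set.inter s).Nodup := by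
  induction ts generalizing s with
  | nil => exact h
  | cons t ts ih => exact ih _ (PySem.Set.nodup_inter _ _ h)

theorem count_ofList (x : Char) (l : List Char) :
    (PySem.Set.ofList l).count x = if x ∈ l then 1 else 0 := by
  by_cases h : x ∈ l
  · rw [if_pos h]
    exact List.count_eq_one_of_mem (PySem.Set.nodup_ofList l) ((PySem.Set.mem_ofList l x).mpr h)
  · rw [if_neg h]
    exact List.count_eq_zero_of_not_mem (fun hx => h ((PySem.Set.mem_ofList l x).mp hx))

theorem sum_map_ite_mem (lines : List (List Char)) (x : Char) :
    (lines.map (fun l => if x ∈ l then 1 else 0)).sum = lines.countP (fun l => decide (x ∈ l)) := by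
  induction lines with
  | nil => simp
  | cons l ls ih =>
    by_cases h : x ∈ l
    · simp [h, ih]; omega
    · simp [h, ih]

theorem count_flat (lines : List (List Char)) (x : Char) :
    (lines.flatMap (fun l => PySem.Set.ofList l)).count x = lines.countP (fun l => decide (x ∈ l)) := by
  rw [List.count_flatMap, ← sum_map_ite_mem]
  apply congrArg List.sum
  apply List.map_congr_left
  intro l _
  simp [Function.comp, count_ofList]

-- the core per-group identity: |⋂ sets| = #{distinct chars whose per-line-deduped count = #lines}
theorem core (lines : List (List Char)) :
    ((lines.map (fun item => PySem.Set.ofList item)).foldl PySem.Set.inter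
        ((lines.map (fun item => PySem.Set.ofList item)).headD PySem.Set.empty)).length
    = (PySem.Set.ofList (lines.flatMap (fun l => PySem.Set.ofList l))).countP
        (fun k => ((lines.flatMap (fun l => PySem.Set.ofList l)).count k : Int) == (lines.length : Int)) := by
  cases lines with
  | nil => simp [PySem.Set.empty]
  | cons l0 rest =>
    set lines := l0 :: rest with hlines
    set L := lines.flatMap (fun l => PySem.Set.ofList l) with hL
    set n := lines.length with hn
    rw [List.countP_eq_length_filter]
    have hmemF : ∀ x, x ∈ (lines.map (fun item => PySem.Set.ofList item)).foldl PySem.Set.inter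
        ((lines.map (fun item => PySem.Set.ofList item)).headD PySem.Set.empty) ↔
        ∀ l ∈ lines, x ∈ l := by
      intro x
      rw [mem_foldl_inter]
      constructor
      · rintro ⟨_, hall⟩ l hl
        have := hall (PySem.Set.ofList l) (List.mem_map_of_mem hl)
        exact (PySem.Set.mem_ofList l x).mp this
      · intro h
        constructor
        · simp only [hlines, List.map_cons, List.headD_cons]
          exact (PySem.Set.mem_ofList l0 x).mpr (h l0 (by simp [hlines]))
        · intro t ht
          obtain ⟨l, hl, rfl⟩ := List.mem_map.mp ht
          exact (PySem.Set.mem_ofList l x).mpr (h l hl)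
    have hcount : ∀ x, (((L.count x : Int) == (n : Int)) = true) ↔ ∀ l ∈ lines, x ∈ l := by
      intro x
      rw [beq_iff_eq, Int.natCast_inj]
      rw [hL, count_flat, hn]
      rw [List.countP_eq_length]
      simp
    have hmemG : ∀ x, x ∈ (PySem.Set.ofList L).filter
        (fun k => ((L.count k : Int) == (n : Int))) ↔ ∀ l ∈ lines, x ∈ l := by
      intro x
      rw [List.mem_filter, hcount]
      constructor
      · rintro ⟨_, h⟩; exact h
      · intro h
        refine ⟨?_, h⟩
        rw [PySem.Set.mem_ofList, hL]
        refine List.mem_flatMap.mpr ⟨l0, by simp [hlines], ?_⟩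
        exact (PySem.Set.mem_ofList l0 x).mpr (h l0 (by simp [hlines]))
    have hperm : ((lines.map (fun item => PySem.Set.ofList item)).foldl PySem.Set.inter
        ((lines.map (fun item => PySem.Set.ofList item)).headD PySem.Set.empty)).Perm
        ((PySem.Set.ofList L).filter (fun k => ((L.count k : Int) == (n : Int)))) := by
      rw [List.perm_ext_iff_of_nodup]
      · intro a; rw [hmemF, hmemG]
      · apply nodup_foldl_inter
        simp only [hlines, List.map_cons, List.headD_cons]
        exact PySem.Set.nodup_ofList l0
      · exact List.Nodup.filter _ (PySem.Set.nodup_ofList L)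
    exact hperm.length_eq

theorem values_counter_eq (xs : List Char) :
    PySem.Dict.values (PySem.Dict.counter xs)
    = (PySem.Set.ofList xs).map (fun k => ((xs.count k : Nat) : Int)) := by
  have : PySem.Dict.values (PySem.Dict.counter xs)
      = ((PySem.Dict.counter xs).items).map Prod.snd := by
    cases (PySem.Dict.counter xs) with
    | mk items => simp [PySem.Dict.values_mk]
  rw [this, PySem.Dict.items_counter, List.map_map]
  rfl

-- the two per-block branch computations agree
theorem blockEq (output : Int) (lines : List (List Char)) :
    (if lines.length == 1 then output + ((lines.headD []).length : Int)
    else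
      let sets : List (PySem.Set Char) := lines.map (fun item => PySem.Set.ofList item)
      output + PySem.Set.len (sets.foldl PySem.Set.inter (sets.headD PySem.Set.empty)))
    =
    (if lines.length == 1 then output + ((lines.headD []).length : Int)
    else
      let counts : PySem.Dict Char Int :=
        lines.foldl (fun d line =>
          (PySem.Set.ofList line).foldl (fun d ch => d.insert ch (d.getD ch 0 + 1)) d)
          PySem.Dict.empty
      output + (PySem.Dict.values counts).foldl
          (fun acc c => if c == (lines.length : Int) then acc + 1 else acc) 0) := by
  by_cases h : lines.length == 1
  · simp [h]
  · simp only [h, Bool.false_eq_true, if_false]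
    congr 1
    have hflat : lines.foldl (fun d line =>
          (PySem.Set.ofList line).foldl (fun d ch => d.insert ch (d.getD ch 0 + 1)) d)
          PySem.Dict.empty
        = PySem.Dict.counter (lines.flatMap (fun l => PySem.Set.ofList l)) := by
      rw [← PySem.Dict.foldl_insert_getD_add_one_eq_counter, List.foldl_flatMap]
    rw [hflat, values_counter_eq, PySem.List.foldl_beq_add_one]
    rw [PySem.Set.len_eq, core lines]
    rw [List.count_eq_countP, List.countP_map]
    rw [zero_add]
    rfl

-- ===== VERDICT (by name: the statement is the Claim_ definition above) =====
theorem part2_spec : Claim_equal_part2 := by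
  intro data _
  unfold Spec_part2 part2 part2_alt
  rw [List.foldl_map]
  congr 1
  funext output block
  exact blockEq output (PySem.Chars.splitOn block "\n".toList)
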